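-- pv_equiv track=rewrite | github.com/Sushanth-s07/AI-powered-interview-simulation-platform | app.py | _calculate_skill_breakdown
-- ===== SOURCE A (Python) =====
-- def _calculate_skill_breakdown(answers):
--     """Calculate skill-based breakdown"""
--     if not answers:
--         return {}
--
--     scores_dict = {}
--     for answer in answers:
--         a = dict(answer)
--         scores_dict['communication'] = a.get('clarity_score', 0)
--         scores_dict['technical_knowledge'] = a.get('technical_score', 0)
--         scores_dict['problem_solving'] = a.get('reasoning_score', 0)
--         scores_dict['clarity'] = a.get('clarity_score', 0)
--         scores_dict['confidence'] = a.get('confidence_score', 0)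
--
--     return scores_dict
-- ===== SOURCE B (Python) =====
-- def _calculate_skill_breakdown(answers):
--     """Calculate skill-based breakdown"""
--     if not answers:
--         return {}
--     a = dict(answers[-1])
--     return {
--         'communication': a.get('clarity_score', 0),
--         'technical_knowledge': a.get('technical_score', 0),
--         'problem_solving': a.get('reasoning_score', 0),
--         'clarity': a.get('clarity_score', 0),
--         'confidence': a.get('confidence_score', 0),
--     }
-- ===== Notes on version B (the rewrite author's own statement) =====
-- stated objective: simpler
-- what changed: A's loop overwrites the same five keys on every iteration, so only the last answer matters; B drops the loop and builds the five-key dict directly from answers[-1].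
import Mathlib
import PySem

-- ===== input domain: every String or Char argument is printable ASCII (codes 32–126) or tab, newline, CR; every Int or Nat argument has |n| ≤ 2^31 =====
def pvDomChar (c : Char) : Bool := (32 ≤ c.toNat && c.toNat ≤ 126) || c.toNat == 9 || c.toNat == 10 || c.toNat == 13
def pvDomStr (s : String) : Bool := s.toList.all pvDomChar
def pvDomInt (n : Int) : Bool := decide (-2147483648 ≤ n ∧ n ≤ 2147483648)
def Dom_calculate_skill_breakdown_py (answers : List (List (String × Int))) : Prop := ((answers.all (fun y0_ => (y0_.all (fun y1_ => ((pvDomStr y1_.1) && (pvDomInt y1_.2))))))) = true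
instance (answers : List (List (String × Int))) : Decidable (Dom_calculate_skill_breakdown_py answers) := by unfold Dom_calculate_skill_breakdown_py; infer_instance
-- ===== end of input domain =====

-- B drops A's loop: A overwrites the same five keys each iteration, so only the last answer matters; B builds the dict from answers[-1] directly (simpler).


-- ===== PORT A =====
-- loop body: a = dict(answer); five overwriting assignments into scores_dict
def skillStep (d : PySem.Dict String Int) (answer : List (String × Int)) : PySem.Dict String Int :=
  let a := PySem.Dict.ofList answer
  ((((d.insert "communication" (a.getD "clarity_score" 0)).insert
      "technical_knowledge" (a.getD "technical_score" 0)).insert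
      "problem_solving" (a.getD "reasoning_score" 0)).insert
      "clarity" (a.getD "clarity_score" 0)).insert
      "confidence" (a.getD "confidence_score" 0)

def calculate_skill_breakdown_py (answers : List (List (String × Int))) : List (String × Int) :=
  if answers = [] then []
  else (answers.foldl skillStep PySem.Dict.empty).items

-- ===== PORT B =====
def calculate_skill_breakdown_py_alt (answers : List (List (String × Int))) : List (String × Int) :=
  match answers.getLast? with
  | none => []
  | some last =>
    let a := PySem.Dict.ofList last
    [("communication", a.getD "clarity_score" 0),
     ("technical_knowledge", a.getD "technical_score" 0),
     ("problem_solving", a.getD "reasoning_score" 0),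
     ("clarity", a.getD "clarity_score" 0),
     ("confidence", a.getD "confidence_score" 0)]

-- ===== PRECONDITION & SPEC =====
def Spec_calculate_skill_breakdown_py (answers : List (List (String × Int))) (out : List (String × Int)) : Prop := out = calculate_skill_breakdown_py_alt answers
instance (answers : List (List (String × Int))) (out : List (String × Int)) : Decidable (Spec_calculate_skill_breakdown_py answers out) := by unfold Spec_calculate_skill_breakdown_py; infer_instance

-- ===== CLAIM (what is proved, stated in full; the proofs are below) =====
def Claim_equal_calculate_skill_breakdown_py : Prop := ∀ (answers : List (List (String × Int))), Dom_calculate_skill_breakdown_py answers → Spec_calculate_skill_breakdown_py answers (calculate_skill_breakdown_py answers)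

-- ===== LEMMAS AND PROOFS =====

-- the state after one loop iteration is a five-key dict with these exact keys in this order
lemma skillStep_empty (a : List (String × Int)) :
    skillStep PySem.Dict.empty a =
      PySem.Dict.mk [("communication", (PySem.Dict.ofList a).getD "clarity_score" 0),
                     ("technical_knowledge", (PySem.Dict.ofList a).getD "technical_score" 0),
                     ("problem_solving", (PySem.Dict.ofList a).getD "reasoning_score" 0),
                     ("clarity", (PySem.Dict.ofList a).getD "clarity_score" 0),
                     ("confidence", (PySem.Dict.ofList a).getD "confidence_score" 0)] := by
  simp [skillStep, PySem.Dict.insert, PySem.Dict.empty, PySem.Dict.contains]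

-- a later iteration overwrites the five keys in place: the previous answer is absorbed
lemma skillStep_absorb (a b : List (String × Int)) :
    skillStep (skillStep PySem.Dict.empty a) b = skillStep PySem.Dict.empty b := by
  rw [skillStep_empty a, skillStep_empty b]
  simp [skillStep, PySem.Dict.insert, PySem.Dict.contains]

lemma foldl_skillStep (xs : List (List (String × Int))) (a : List (String × Int)) :
    xs.foldl skillStep (skillStep PySem.Dict.empty a) =
      skillStep PySem.Dict.empty ((a :: xs).getLast (by simp)) := by
  induction xs generalizing a with
  | nil => rfl
  | cons x xs ih =>
      rw [List.foldl_cons, skillStep_absorb a x, ih x]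
      simp

-- ===== VERDICT (by name: the statement is the Claim_ definition above) =====
theorem calculate_skill_breakdown_py_spec : Claim_equal_calculate_skill_breakdown_py := by
  intro answers _
  unfold Spec_calculate_skill_breakdown_py calculate_skill_breakdown_py calculate_skill_breakdown_py_alt
  match answers with
  | [] => rfl
  | a :: xs =>
      rw [List.foldl_cons, foldl_skillStep, skillStep_empty]
      rw [List.getLast?_eq_some_getLast (l := a :: xs) (by simp)]; simp
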